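-- pv_equiv track=rewrite | github.com/WnndGws/wynammbracket | wynammBracket.py | calc_longest_team
-- ===== SOURCE A (Python) =====
-- def calc_longest_team(matchups_dict):
--     ''' Return spaces matching length of longest team name.'''
--     matchup_number = 0
--     longest_length = 0
--     while matchup_number < len(matchups_dict):
--         wyn_team = list(matchups_dict)[matchup_number]
--         amm_team = matchups_dict[list(matchups_dict)[matchup_number]]
--         matchup_number += 1
--         if len(wyn_team) > longest_length:
--             longest_length = len(wyn_team)
--         elif len(amm_team) > longest_length:
--             longest_length = len(wyn_team)
--     return longest_length
-- ===== SOURCE B (Python) =====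
-- def calc_longest_team(matchups_dict):
--     ''' Return spaces matching length of longest team name.'''
--     longest_length = 0
--     for wyn_team, amm_team in matchups_dict.items():
--         if len(wyn_team) > longest_length:
--             longest_length = len(wyn_team)
--         elif len(amm_team) > longest_length:
--             longest_length = len(wyn_team)
--     return longest_length
-- ===== Notes on version B (the rewrite author's own statement) =====
-- stated objective: faster
-- what changed: B makes one pass over dict.items() with the same if/elif branch logic, instead of rebuilding list(matchups_dict) and doing a key lookup on every iteration of an index-driven while loop.
import Mathlib
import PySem

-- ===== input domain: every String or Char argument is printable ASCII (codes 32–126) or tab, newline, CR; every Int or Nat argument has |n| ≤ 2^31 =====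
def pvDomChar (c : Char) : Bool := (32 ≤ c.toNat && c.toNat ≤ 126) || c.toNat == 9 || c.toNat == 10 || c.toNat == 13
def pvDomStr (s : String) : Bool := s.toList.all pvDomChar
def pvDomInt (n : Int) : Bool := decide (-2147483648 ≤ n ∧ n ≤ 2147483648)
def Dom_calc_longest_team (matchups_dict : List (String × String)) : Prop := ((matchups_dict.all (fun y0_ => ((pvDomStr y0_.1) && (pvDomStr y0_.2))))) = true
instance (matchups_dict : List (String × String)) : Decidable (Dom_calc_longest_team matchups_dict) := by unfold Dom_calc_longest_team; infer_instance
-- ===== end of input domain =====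

-- B replaces A's index-driven while loop (which rebuilds list(matchups_dict) and does a dict
-- lookup on every iteration) by a single pass over dict.items() with the same branch logic.

-- ===== PORT A =====
def calc_longest_team (matchups_dict : List (String × String)) : Int :=
  (PySem.List.pyRange 0 (PySem.List.len matchups_dict) 1).foldl
    (fun longest_length i =>
      let wyn_team := PySem.List.pyGetD (matchups_dict.map Prod.fst) i ""
      let amm_team := ((PySem.Dict.mk matchups_dict).get? wyn_team).getD ""
      if PySem.Str.len wyn_team > longest_length then PySem.Str.len wyn_team
      else if PySem.Str.len amm_team > longest_length then PySem.Str.len wyn_team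
      else longest_length) 0

-- ===== PORT B =====
def calc_longest_team_alt (matchups_dict : List (String × String)) : Int :=
  matchups_dict.foldl
    (fun longest_length p =>
      if PySem.Str.len p.1 > longest_length then PySem.Str.len p.1
      else if PySem.Str.len p.2 > longest_length then PySem.Str.len p.1
      else longest_length) 0

-- ===== PRECONDITION & SPEC =====
-- Pre_ excludes association lists with duplicate keys: a Python dict can never hold them,
-- so such lists do not represent any input the Python programs can receive.
def Pre_calc_longest_team (matchups_dict : List (String × String)) : Prop :=
  (matchups_dict.map Prod.fst).Nodup
instance (matchups_dict : List (String × String)) : Decidable (Pre_calc_longest_team matchups_dict) := by unfold Pre_calc_longest_team; infer_instance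
def pvWitness_calc_longest_team : (List (String × String)) := [("wyn team", "a"), ("b", "amm team")]
def Spec_calc_longest_team (matchups_dict : List (String × String)) (out : Int) : Prop := out = calc_longest_team_alt matchups_dict
instance (matchups_dict : List (String × String)) (out : Int) : Decidable (Spec_calc_longest_team matchups_dict out) := by unfold Spec_calc_longest_team; infer_instance

-- ===== CLAIM (what is proved, stated in full; the proofs are below) =====
def Claim_equal_calc_longest_team : Prop := ∀ (matchups_dict : List (String × String)), Dom_calc_longest_team matchups_dict → Pre_calc_longest_team matchups_dict → Spec_calc_longest_team matchups_dict (calc_longest_team matchups_dict)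

-- ===== LEMMAS AND PROOFS =====

-- The step function of both loops, phrased on a key/value pair.
def pvStep (longest_length : Int) (p : String × String) : Int :=
  if PySem.Str.len p.1 > longest_length then PySem.Str.len p.1
  else if PySem.Str.len p.2 > longest_length then PySem.Str.len p.1
  else longest_length

-- Folding A's step (which looks each key up in the full dict) over the key list equals
-- folding B's step over the pair list, provided the keys are distinct.
theorem pvFold_keys_eq (m : List (String × String))
    (h : (m.map Prod.fst).Nodup) (init : Int) :
    (m.map Prod.fst).foldl
      (fun longest_length k =>
        pvStep longest_length (k, ((PySem.Dict.mk m).get? k).getD "")) init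
    = m.foldl pvStep init := by
  induction m generalizing init with
  | nil => rfl
  | cons hd t ih =>
    simp only [List.map_cons, List.foldl_cons, List.nodup_cons] at h ⊢
    rw [PySem.List.foldl_congr_mem
      (g := fun longest_length k =>
        pvStep longest_length (k, ((PySem.Dict.mk t).get? k).getD ""))]
    · rw [ih h.2]
      congr 1
      rw [PySem.Dict.get?_mk_cons]
      simp [pvStep]
    · intro acc k hk
      have hne : ¬ (hd.1 == k) = true := by
        simp only [beq_iff_eq]
        intro he; exact h.1 (he ▸ hk)
      rw [PySem.Dict.get?_mk_cons, if_neg hne]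

-- ===== VERDICT (by name: the statement is the Claim_ definition above) =====
theorem calc_longest_team_spec : Claim_equal_calc_longest_team := by
  intro m _ hpre
  unfold Spec_calc_longest_team calc_longest_team calc_longest_team_alt
  have hlen : PySem.List.len m = ((m.map Prod.fst).length : Int) := by
    simp [PySem.List.len_eq]
  rw [hlen]
  show (PySem.List.pyRange 0 ((m.map Prod.fst).length : Int) 1).foldl
      (fun longest_length i =>
        pvStep longest_length
          (PySem.List.pyGetD (m.map Prod.fst) i "",
           ((PySem.Dict.mk m).get? (PySem.List.pyGetD (m.map Prod.fst) i "")).getD "")) 0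
    = m.foldl pvStep 0
  rw [PySem.List.foldl_pyRange_zero_pyGetD' (m.map Prod.fst) ""
      (fun longest_length k =>
        pvStep longest_length (k, ((PySem.Dict.mk m).get? k).getD "")) 0]
  exact pvFold_keys_eq m hpre 0
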